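-- pv_equiv track=rewrite | github.com/efcy/visual_analytics | utils/multithreading_image_extract.py | my_generator
-- ===== SOURCE A (Python) =====
-- def my_generator(images, batch_size: int = 50):
--     batch = []
--     for image in images:
--         batch.append(image)
--         if len(batch) == batch_size:
--             yield batch
--             batch = []
--     # for the last items
--     if batch:
--         yield batch
-- ===== SOURCE B (Python) =====
-- from itertools import islice
--
-- def my_generator(images, batch_size: int = 50):
--     it = iter(images)
--     while True:
--         batch = list(islice(it, batch_size))
--         if not batch:
--             return
--         yield batch
-- ===== Notes on version B (the rewrite author's own statement) =====
-- stated objective: idiomatic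
-- what changed: Replaces the element-by-element accumulator with a length test by a single consumed iterator sliced into chunks with itertools.islice.
-- intended difference: On batch_size == 0 with nonempty images A returns the whole input as one final batch (its length check never fires) while B yields no batches; yielding nothing is the intended result of asking for batches of size 0. — e.g. on my_generator(["a"], 0): A returns [["a"]], B returns []
-- outside the precondition, e.g. on my_generator(['a', 'b'], -1): A returns [['a', 'b']], B raises ValueError
import Mathlib
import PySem

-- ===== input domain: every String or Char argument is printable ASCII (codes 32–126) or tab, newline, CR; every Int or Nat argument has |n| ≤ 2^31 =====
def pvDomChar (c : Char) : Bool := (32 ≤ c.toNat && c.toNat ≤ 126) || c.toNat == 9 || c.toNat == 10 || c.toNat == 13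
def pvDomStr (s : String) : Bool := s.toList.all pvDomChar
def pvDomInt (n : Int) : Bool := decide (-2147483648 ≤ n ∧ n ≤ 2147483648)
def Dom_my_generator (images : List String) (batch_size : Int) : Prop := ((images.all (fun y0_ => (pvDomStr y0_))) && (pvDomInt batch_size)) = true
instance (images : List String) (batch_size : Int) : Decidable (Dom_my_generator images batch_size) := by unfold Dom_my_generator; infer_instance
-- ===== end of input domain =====

-- B replaces A's element-by-element accumulator (with a length test) by a single consumed
-- stream sliced into chunks (itertools.islice); idiomatic, same cost. Equivalence is about
-- the list of yielded batches; neither version mutates its argument.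

-- ===== PORT A =====
-- A's for-loop with the running `batch`/yield accumulator, as structural recursion over `images`.
def myGenLoopA (images : List String) (bs : Int) (out : List (List String)) (batch : List String) : List (List String) :=
  match images with
  | [] => if batch ≠ [] then out ++ [batch] else out
  | image :: rest =>
      let batch' := batch ++ [image]
      if (batch'.length : Int) = bs then myGenLoopA rest bs (out ++ [batch']) []
      else myGenLoopA rest bs out batch'

def my_generator (images : List String) (batch_size : Int) : List (List String) :=
  myGenLoopA images batch_size [] []

-- ===== PORT B =====
-- B's `while True: batch = list(islice(it, batch_size))` loop: slice `n` items off the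
-- remaining stream, stop on an empty slice.  (Negative batch_size raises in B: outside Pre_.)
def myGenChunks (it : List String) (n : Nat) : List (List String) :=
  if h : it.take n = [] then []
  else (it.take n) :: myGenChunks (it.drop n) n
termination_by it.length
decreasing_by
  have hn : n ≠ 0 := by rintro rfl; simp at h
  have hit : it ≠ [] := by rintro rfl; simp at h
  cases it with
  | nil => exact absurd rfl hit
  | cons a l => simp only [List.length_drop, List.length_cons]; omega

def my_generator_alt (images : List String) (batch_size : Int) : List (List String) :=
  myGenChunks images batch_size.toNat

-- ===== PRECONDITION & SPEC =====
-- Pre_ excludes negative batch_size: A's `len(batch) == batch_size` never fires there so A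
-- returns everything as one final batch, while B's islice raises ValueError.
def Pre_my_generator (images : List String) (batch_size : Int) : Prop := 0 ≤ batch_size
instance (images : List String) (batch_size : Int) : Decidable (Pre_my_generator images batch_size) := by unfold Pre_my_generator; infer_instance
def pvWitness_my_generator : List String × Int := (["a", "b", "c"], 2)

-- On batch_size == 0 with nonempty images A returns the whole input as one final batch (its
-- length check never fires) while B yields no batches; yielding nothing is the intended
-- result of asking for batches of size 0.
def D_my_generator (images : List String) (batch_size : Int) : Prop := batch_size = 0 ∧ images ≠ []
instance (images : List String) (batch_size : Int) : Decidable (D_my_generator images batch_size) := by unfold D_my_generator; infer_instance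

def Spec_my_generator (images : List String) (batch_size : Int) (out : List (List String)) : Prop := ¬ D_my_generator images batch_size → out = my_generator_alt images batch_size
instance (images : List String) (batch_size : Int) (out : List (List String)) : Decidable (Spec_my_generator images batch_size out) := by unfold Spec_my_generator; infer_instance

def pvDiffWitness_my_generator : List String × Int := (["a"], 0)
def pvDiffWitnessOut_my_generator : (List (List String)) × (List (List String)) := ([["a"]], [])

-- ===== CLAIM (what is proved, stated in full; the proofs are below) =====
def Claim_unchanged_my_generator : Prop := ∀ (images : List String) (batch_size : Int), Dom_my_generator images batch_size → Pre_my_generator images batch_size → Spec_my_generator images batch_size (my_generator images batch_size)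
def Claim_changed_my_generator : Prop := Dom_my_generator (pvDiffWitness_my_generator.1) (pvDiffWitness_my_generator.2) ∧ Pre_my_generator (pvDiffWitness_my_generator.1) (pvDiffWitness_my_generator.2) ∧ D_my_generator (pvDiffWitness_my_generator.1) (pvDiffWitness_my_generator.2) ∧ my_generator (pvDiffWitness_my_generator.1) (pvDiffWitness_my_generator.2) = pvDiffWitnessOut_my_generator.1 ∧ my_generator_alt (pvDiffWitness_my_generator.1) (pvDiffWitness_my_generator.2) = pvDiffWitnessOut_my_generator.2 ∧ pvDiffWitnessOut_my_generator.1 ≠ pvDiffWitnessOut_my_generator.2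
def Claim_exact_my_generator : Prop := ∀ (images : List String) (batch_size : Int), Dom_my_generator images batch_size → Pre_my_generator images batch_size → D_my_generator images batch_size → my_generator images batch_size ≠ my_generator_alt images batch_size

-- ===== LEMMAS AND PROOFS =====

-- A's loop with batch_size = 0: the test never fires, everything ends in the final batch.
theorem myGenLoopA_zero (images : List String) (out : List (List String)) (batch : List String) :
    myGenLoopA images 0 out batch =
      if batch ++ images ≠ [] then out ++ [batch ++ images] else out := by
  induction images generalizing batch with
  | nil => simp [myGenLoopA]
  | cons a l ih =>
      rw [myGenLoopA]
      have : ((batch ++ [a]).length : Int) ≠ 0 := by simp; positivity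
      rw [if_neg this, ih]
      simp

-- A's loop from a partial batch shorter than n equals `out ++` B's chunking of the rest.
theorem myGenLoopA_eq_chunks (images : List String) (n : Nat) (hn : 0 < n)
    (out : List (List String)) (batch : List String) (hb : batch.length < n) :
    myGenLoopA images (n : Int) out batch = out ++ myGenChunks (batch ++ images) n := by
  induction images generalizing out batch with
  | nil =>
      rw [myGenLoopA, myGenChunks]
      rcases eq_or_ne batch [] with rfl | hne
      · simp
      · have htake : batch.take n = batch := List.take_of_length_le (le_of_lt hb)
        simp only [List.append_nil, htake]
        rw [dif_neg hne]
        have hd : batch.drop n = [] := List.drop_eq_nil_of_le (le_of_lt hb)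
        rw [hd, myGenChunks]
        simp [hne]
  | cons a l ih =>
      rw [myGenLoopA]
      by_cases hfull : (batch ++ [a]).length = n
      · rw [if_pos (by exact_mod_cast hfull), ih (out ++ [batch ++ [a]]) [] (by simpa using hn)]
        have htake : (batch ++ [a] ++ l).take n = batch ++ [a] := by
          rw [← hfull]; exact List.take_left
        have hdrop : (batch ++ [a] ++ l).drop n = l := by
          rw [← hfull]; exact List.drop_left
        have hrhs : myGenChunks (batch ++ a :: l) n = (batch ++ [a]) :: myGenChunks l n := by
          have hsplit : batch ++ a :: l = batch ++ [a] ++ l := by simp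
          rw [hsplit, myGenChunks, dif_neg (by rw [htake]; simp), htake, hdrop]
        rw [hrhs]
        simp
      · have hlt : (batch ++ [a]).length < n := by
          have h1 : (batch ++ [a]).length = batch.length + 1 := by simp
          omega
        rw [if_neg (fun hc => hfull (by exact_mod_cast hc)), ih out (batch ++ [a]) hlt]
        simp

theorem myGenChunks_zero (it : List String) : myGenChunks it 0 = [] := by
  rw [myGenChunks]; simp

-- ===== VERDICT (by name: the statement is the Claim_ definition above) =====
theorem my_generator_spec : Claim_unchanged_my_generator := by
  intro images batch_size _ hpre hnd
  unfold my_generator my_generator_alt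
  rcases eq_or_lt_of_le hpre with hz | hpos
  · -- batch_size = 0: D_ forces images = []
    have hbs : batch_size = 0 := hz.symm
    subst hbs
    have himg : images = [] := by
      by_contra h
      exact hnd ⟨rfl, h⟩
    subst himg
    simp [myGenLoopA, myGenChunks_zero]
  · have hn : batch_size = ((batch_size.toNat : Nat) : Int) :=
      (Int.toNat_of_nonneg hpre).symm
    conv_lhs => rw [hn]
    have := myGenLoopA_eq_chunks images batch_size.toNat
      (by omega) [] [] (by simpa using (by omega : 0 < batch_size.toNat))
    simpa using this

theorem my_generator_changed : Claim_changed_my_generator := by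
  unfold Claim_changed_my_generator
  refine ⟨by decide, by decide, by decide, by decide, ?_, by decide⟩
  show my_generator_alt ["a"] 0 = []
  unfold my_generator_alt
  exact myGenChunks_zero _

theorem my_generator_tight : Claim_exact_my_generator := by
  intro images batch_size _ _ hd
  obtain ⟨rfl, hne⟩ := hd
  unfold my_generator my_generator_alt
  rw [myGenLoopA_zero]
  simp [hne, myGenChunks_zero]
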